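-- pv_equiv track=rewrite | github.com/SamuelSchlesinger/empirical-circuit-complexity | gen/generate.py | apply_perm_to_func
-- ===== SOURCE A (Python) =====
-- def apply_perm_to_input_idx(perm, j, n):
--     """Given permutation perm on {0,...,n-1} and truth table input index j,
--     compute the permuted input index j'.
--
--     If g(x) = f(x ∘ σ) where σ = perm, then g's output at input j equals
--     f's output at input j', where j' re-indexes the bits of j by σ."""
--     j_prime = 0
--     for i in range(n):
--         bit = (j >> perm[i]) & 1
--         j_prime |= bit << i
--     return j_prime
--
-- def apply_perm_to_func(perm, func_idx, n):
--     """Compute the function index of g where g(x) = f(x ∘ σ)."""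
--     num_inputs = 1 << n
--     new_idx = 0
--     for j in range(num_inputs):
--         j_prime = apply_perm_to_input_idx(perm, j, n)
--         bit = (func_idx >> j_prime) & 1
--         new_idx |= bit << j
--     return new_idx
-- ===== SOURCE B (Python) =====
-- def apply_perm_to_func(perm, func_idx, n):
--     """Compute the function index of g where g(x) = f(x o sigma).
--
--     Gray-style incremental version: enumerate inputs j in order, and update the
--     permuted index jp incrementally.  Going from j to j+1 flips exactly the low
--     bits of j named by j ^ (j+1) (a block of low ones); the corresponding flip
--     set of jp is precomputed per highest-flipped-bit t as delta[t]."""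
--     size = 1 << n
--     # delta[t]: output-bit positions fed by input bits 0..t
--     delta = []
--     for t in range(n):
--         d = 0
--         for i in range(n):
--             if 0 <= perm[i] <= t:
--                 d |= 1 << i
--         delta.append(d)
--     new_idx = 0
--     jp = 0
--     for j in range(size):
--         new_idx |= ((func_idx >> jp) & 1) << j
--         if j + 1 < size:
--             t = (j ^ (j + 1)).bit_length() - 1
--             jp ^= delta[t]
--     return new_idx
-- ===== Notes on version B (the rewrite author's own statement) =====
-- stated objective: alternative
-- what changed: A recomputes the permuted input index j' from scratch with an inner O(n) bit loop for each of the 2^n inputs; B precomputes per-highest-flipped-bit XOR flip masks (delta) once and updates j' incrementally across consecutive j (the XOR of consecutive indices is a block of low ones), removing the inner loop.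
import Mathlib
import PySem

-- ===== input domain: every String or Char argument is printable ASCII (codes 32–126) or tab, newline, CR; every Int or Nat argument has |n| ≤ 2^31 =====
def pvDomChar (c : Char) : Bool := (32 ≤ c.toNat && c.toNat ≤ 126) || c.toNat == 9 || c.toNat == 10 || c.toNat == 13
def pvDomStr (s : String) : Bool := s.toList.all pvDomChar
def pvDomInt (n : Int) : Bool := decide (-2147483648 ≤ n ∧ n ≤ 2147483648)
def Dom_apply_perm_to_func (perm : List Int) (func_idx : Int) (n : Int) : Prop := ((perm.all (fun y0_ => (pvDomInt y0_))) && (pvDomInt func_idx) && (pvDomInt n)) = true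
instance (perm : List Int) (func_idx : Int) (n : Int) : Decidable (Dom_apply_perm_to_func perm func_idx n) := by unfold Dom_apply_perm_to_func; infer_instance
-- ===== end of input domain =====

-- B replaces A's per-input inner loop (recompute the permuted index for every j) by a Gray-style
-- incremental XOR update of the permuted index with precomputed flip masks: objective 'alternative'.

-- ===== PORT A =====
def apply_perm_to_input_idx (perm : List Int) (j : Int) (n : Int) : Int :=
  (PySem.List.pyRange 0 n 1).foldl (fun j_prime i =>
    -- 'j >> perm[i]': Python raises on negative perm[i] and on i ≥ len(perm) (both excluded by Pre_)
    let bit := PySem.Int.band (j >>> (PySem.List.pyGetD perm i 0).toNat) 1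
    PySem.Int.bor j_prime (bit <<< i.toNat)) 0

def apply_perm_to_func (perm : List Int) (func_idx : Int) (n : Int) : Int :=
  -- '1 << n' raises in Python for n < 0 (excluded by Pre_)
  let num_inputs : Int := (1 : Int) <<< n.toNat
  (PySem.List.pyRange 0 num_inputs 1).foldl (fun new_idx j =>
    let j_prime := apply_perm_to_input_idx perm j n
    -- j_prime ≥ 0 always, so '.toNat' is exact for 'func_idx >> j_prime'
    let bit := PySem.Int.band (func_idx >>> j_prime.toNat) 1
    PySem.Int.bor new_idx (bit <<< j.toNat)) 0

-- ===== PORT B =====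
def apply_perm_to_func_alt (perm : List Int) (func_idx : Int) (n : Int) : Int :=
  let size : Int := (1 : Int) <<< n.toNat
  -- delta[t]: output-bit positions fed by input bits 0..t
  let delta : List Int := (PySem.List.pyRange 0 n 1).foldl (fun delta t =>
      delta ++ [(PySem.List.pyRange 0 n 1).foldl (fun d i =>
          let b := PySem.List.pyGetD perm i 0
          if 0 ≤ b ∧ b ≤ t then PySem.Int.bor d ((1 : Int) <<< i.toNat) else d) 0]) []
  ((PySem.List.pyRange 0 size 1).foldl (fun (p : Int × Int) j =>
      (PySem.Int.bor p.1 (PySem.Int.band (func_idx >>> p.2.toNat) 1 <<< j.toNat),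
       if j + 1 < size then
         PySem.Int.bxor p.2 (PySem.List.pyGetD delta
           ((PySem.Int.bitLength (PySem.Int.bxor j (j + 1)) : Int) - 1) 0)
       else p.2))
    ((0 : Int), (0 : Int))).1

-- ===== PRECONDITION & SPEC =====
-- Pre_: exactly the inputs where Python A returns normally: n ≥ 0 ('1 << n'), perm long enough
-- (no IndexError) and perm[i] ≥ 0 for i < n (no 'negative shift count' ValueError).
def Pre_apply_perm_to_func (perm : List Int) (func_idx : Int) (n : Int) : Prop :=
  0 ≤ n ∧ n ≤ (perm.length : Int) ∧ ∀ x ∈ perm.take n.toNat, 0 ≤ x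
instance (perm : List Int) (func_idx : Int) (n : Int) : Decidable (Pre_apply_perm_to_func perm func_idx n) := by
  unfold Pre_apply_perm_to_func; infer_instance
def pvWitness_apply_perm_to_func : List Int × Int × Int := ([1, 0, 2], 203, 3)

def Spec_apply_perm_to_func (perm : List Int) (func_idx : Int) (n : Int) (out : Int) : Prop := out = apply_perm_to_func_alt perm func_idx n
instance (perm : List Int) (func_idx : Int) (n : Int) (out : Int) : Decidable (Spec_apply_perm_to_func perm func_idx n out) := by unfold Spec_apply_perm_to_func; infer_instance

-- ===== CLAIM (what is proved, stated in full; the proofs are below) =====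
def Claim_equal_apply_perm_to_func : Prop := ∀ (perm : List Int) (func_idx : Int) (n : Int), Dom_apply_perm_to_func perm func_idx n → Pre_apply_perm_to_func perm func_idx n → Spec_apply_perm_to_func perm func_idx n (apply_perm_to_func perm func_idx n)

-- ===== LEMMAS AND PROOFS =====

-- source bit position feeding output bit q (Nat level)
def srcOf (perm : List Int) (q : Nat) : Nat := (perm.getD q 0).toNat

-- Nat-level permuted input index (mirrors A's inner loop)
def phiN (perm : List Int) (N j : Nat) : Nat :=
  (List.range N).foldl (fun acc i => acc ||| ((if j.testBit (srcOf perm i) then 1 else 0) <<< i)) 0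

-- Nat-level flip mask for a Gray step whose highest flipped input bit is t
def deltaN (perm : List Int) (N t : Nat) : Nat :=
  (List.range N).foldl (fun d i => if srcOf perm i ≤ t then d ||| (1 <<< i) else d) 0

-- fold over casts commutes with the Nat-level fold
theorem foldl_cast_comm (fI : Int → Int → Int) (fN : Nat → Nat → Nat) :
    ∀ (l : List Nat), (∀ (a i : Nat), i ∈ l → fI (a : Int) (i : Int) = ((fN a i : Nat) : Int)) →
    ∀ a : Nat, (l.map (fun (i : Nat) => (i : Int))).foldl fI (a : Int) = ((l.foldl fN a : Nat) : Int)
  | [], _, _ => rfl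
  | x :: xs, h, a => by
      simp only [List.map_cons, List.foldl_cons]
      rw [h a x (by simp)]
      exact foldl_cast_comm fI fN xs (fun a i hi => h a i (by simp [hi])) (fN a x)

theorem natCast_shiftLeft (m k : Nat) : ((m : Int) <<< k) = ((m <<< k : Nat) : Int) := by
  simp [Int.shiftLeft_eq, Nat.shiftLeft_eq]

theorem cast_shift (a : Int) (k : Nat) : a <<< ((k : Nat) : Int) = a <<< k :=
  Int.shiftLeft_natCast_right a k

theorem shift_and_one (j k : Nat) : (j >>> k) &&& 1 = if j.testBit k then 1 else 0 := by
  rw [Nat.and_one_is_mod]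
  rcases h : j.testBit k <;>
    simp [Nat.testBit, Nat.one_and_eq_mod_two] at h <;> norm_num <;> omega

theorem testBit_one' (m : Nat) : (1 : Nat).testBit m = decide (m = 0) := by
  cases m with
  | zero => simp [Nat.testBit_zero]
  | succ m => simp [Nat.testBit_add_one, Nat.zero_testBit]

theorem testBit_bit_shift (b i q : Nat) (hb : b ≤ 1) :
    ((b <<< i).testBit q) = (decide (q = i) && decide (b = 1)) := by
  rcases Nat.le_one_iff_eq_zero_or_eq_one.mp hb with rfl | rfl
  · simp [Nat.zero_shiftLeft, Nat.zero_testBit]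
  · rw [Nat.testBit_shiftLeft, testBit_one']
    by_cases h : q = i
    · subst h; simp
    · rcases Nat.lt_or_ge q i with hlt | hge
      · simp [h, show ¬ i ≤ q by omega]
      · simp [h, show i ≤ q by omega, show q - i ≠ 0 by omega]

theorem phiN_testBit (perm : List Int) (N j q : Nat) :
    (phiN perm N j).testBit q = (decide (q < N) && j.testBit (srcOf perm q)) := by
  induction N with
  | zero => simp [phiN, Nat.zero_testBit]
  | succ N ih =>
      rw [phiN, List.range_succ, List.foldl_append]
      rw [show (List.range N).foldl (fun acc i => acc ||| ((if j.testBit (srcOf perm i) then 1 else 0) <<< i)) 0 = phiN perm N j from rfl]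
      simp only [List.foldl_cons, List.foldl_nil]
      rw [Nat.testBit_or, ih,
        testBit_bit_shift (if j.testBit (srcOf perm N) then 1 else 0) N q (by split <;> omega)]
      have hd : decide ((if j.testBit (srcOf perm N) = true then (1:Nat) else 0) = 1)
          = j.testBit (srcOf perm N) := by
        rcases h : j.testBit (srcOf perm N) <;> simp [h]
      rw [hd]
      rcases Nat.lt_trichotomy q N with h | h | h
      · simp [h, Nat.ne_of_lt h, Nat.lt_succ_of_lt h]
      · subst h; simp
      · simp [show ¬ q < N by omega, show q ≠ N by omega, show ¬ q < N + 1 by omega]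

theorem deltaN_testBit (perm : List Int) (N t q : Nat) :
    (deltaN perm N t).testBit q = (decide (q < N) && decide (srcOf perm q ≤ t)) := by
  induction N with
  | zero => simp [deltaN, Nat.zero_testBit]
  | succ N ih =>
      rw [deltaN, List.range_succ, List.foldl_append]
      rw [show (List.range N).foldl (fun d i => if srcOf perm i ≤ t then d ||| (1 <<< i) else d) 0 = deltaN perm N t from rfl]
      simp only [List.foldl_cons, List.foldl_nil]
      by_cases hc : srcOf perm N ≤ t
      · rw [if_pos hc, Nat.testBit_or, ih, testBit_bit_shift 1 N q (by omega)]
        rcases Nat.lt_trichotomy q N with h | h | h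
        · simp [h, Nat.ne_of_lt h, Nat.lt_succ_of_lt h]
        · subst h; simp [hc]
        · simp [show ¬ q < N by omega, show q ≠ N by omega, show ¬ q < N + 1 by omega]
      · rw [if_neg hc, ih]
        rcases Nat.lt_trichotomy q N with h | h | h
        · simp [h, Nat.lt_succ_of_lt h]
        · subst h; simp [hc]
        · simp [show ¬ q < N by omega, show ¬ q < N + 1 by omega]

theorem phiN_zero (perm : List Int) (N : Nat) : phiN perm N 0 = 0 := by
  apply Nat.eq_of_testBit_eq
  intro i
  simp [phiN_testBit, Nat.zero_testBit]

-- the XOR of consecutive naturals is a block of low ones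
theorem xor_succ_block (j : Nat) : ∃ s, 1 ≤ s ∧ j ^^^ (j + 1) = 2 ^ s - 1 := by
  induction j using Nat.strong_induction_on with
  | _ j IH =>
    rcases Nat.even_or_odd j with ⟨m, hm⟩ | ⟨m, hm⟩
    · refine ⟨1, le_refl 1, ?_⟩
      apply Nat.eq_of_testBit_eq
      intro i
      cases i with
      | zero =>
          rw [Nat.testBit_xor, Nat.testBit_zero, Nat.testBit_zero,
            show j % 2 = 0 by omega, show (j + 1) % 2 = 1 by omega]
          decide
      | succ i =>
          rw [Nat.testBit_xor, Nat.testBit_add_one, Nat.testBit_add_one,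
            show j / 2 = m by omega, show (j + 1) / 2 = m by omega]
          norm_num [testBit_one']
    · obtain ⟨s, hs, hx⟩ := IH m (by omega)
      refine ⟨s + 1, by omega, ?_⟩
      apply Nat.eq_of_testBit_eq
      intro i
      cases i with
      | zero =>
          rw [Nat.testBit_xor, Nat.testBit_zero, Nat.testBit_zero,
            show j % 2 = 1 by omega, show (j + 1) % 2 = 0 by omega,
            Nat.testBit_two_pow_sub_one]
          simp
      | succ i =>
          rw [Nat.testBit_xor, Nat.testBit_add_one, Nat.testBit_add_one,
            show j / 2 = m by omega, show (j + 1) / 2 = m + 1 by omega,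
            ← Nat.testBit_xor, hx, Nat.testBit_two_pow_sub_one,
            Nat.testBit_two_pow_sub_one]
          exact decide_eq_decide.mpr (by omega)

theorem bitLength_pow_sub_one (s : Nat) (hs : 1 ≤ s) :
    PySem.Int.bitLength (((2 ^ s - 1 : Nat) : Int)) = s := by
  have h2s : 2 ≤ 2 ^ s := by
    calc (2:Nat) = 2 ^ 1 := rfl
    _ ≤ 2 ^ s := Nat.pow_le_pow_right (by norm_num) hs
  have h1 := PySem.Int.lt_two_pow_bitLength (((2 ^ s - 1 : Nat) : Int))
  have h2 := PySem.Int.two_pow_bitLength_le (((2 ^ s - 1 : Nat) : Int)) (by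
    have : (2 ^ s - 1 : Nat) ≠ 0 := by omega
    exact_mod_cast this)
  rw [Int.natAbs_natCast] at h1 h2
  set L := PySem.Int.bitLength (((2 ^ s - 1 : Nat) : Int)) with hL
  have hsplit : 2 ^ s = 2 * 2 ^ (s - 1) := by
    conv_lhs => rw [show s = (s - 1) + 1 from by omega]
    ring
  have hA : L - 1 < s := by
    by_contra hc
    have : 2 ^ s ≤ 2 ^ (L - 1) := Nat.pow_le_pow_right (by norm_num) (by omega)
    omega
  have hB : s - 1 < L := by
    by_contra hc
    have : 2 ^ L ≤ 2 ^ (s - 1) := Nat.pow_le_pow_right (by norm_num) (by omega)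
    omega
  have hL1 : 1 ≤ L := by
    by_contra hc
    have hL0 : L = 0 := by omega
    rw [hL0] at h1
    simp at h1
    omega
  omega

-- Gray step for the permuted index
theorem phiN_succ (perm : List Int) (N j s : Nat) (hs : 1 ≤ s)
    (hx : j ^^^ (j + 1) = 2 ^ s - 1) :
    phiN perm N (j + 1) = phiN perm N j ^^^ deltaN perm N (s - 1) := by
  have hj : j + 1 = j ^^^ (2 ^ s - 1) := by
    rw [← hx, ← Nat.xor_assoc, Nat.xor_self, Nat.zero_xor]
  apply Nat.eq_of_testBit_eq
  intro q
  simp only [phiN_testBit, deltaN_testBit, Nat.testBit_xor, hj,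
    Nat.testBit_two_pow_sub_one]
  have he : decide (srcOf perm q < s) = decide (srcOf perm q ≤ s - 1) :=
    decide_eq_decide.mpr (by omega)
  by_cases hq : q < N <;> simp [hq, he]

theorem inner_eq_phiN (perm : List Int) (N j : Nat) :
    apply_perm_to_input_idx perm (j : Int) ((N : Nat) : Int) = ((phiN perm N j : Nat) : Int) := by
  unfold apply_perm_to_input_idx phiN
  rw [PySem.List.pyRange_zero_natCast]
  have h := foldl_cast_comm
    (fun j_prime i => PySem.Int.bor j_prime
      (PySem.Int.band ((j : Int) >>> (PySem.List.pyGetD perm i 0).toNat) 1 <<< i.toNat))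
    (fun acc i => acc ||| ((if j.testBit (srcOf perm i) then 1 else 0) <<< i))
    (List.range N)
    (fun a i _ => by
      have hget : PySem.List.pyGetD perm (i : Int) 0 = perm.getD i 0 := by
        simp [pysem]
      have hshift : ((j : Int) >>> (perm.getD i 0).toNat) = ((j >>> (perm.getD i 0).toNat : Nat) : Int) := rfl
      simp only [hget, Int.toNat_natCast, hshift]
      rw [show (1 : Int) = ((1 : Nat) : Int) from rfl, PySem.Int.band_natCast, shift_and_one]
      rw [natCast_shiftLeft, PySem.Int.bor_natCast]
      rfl)
    0
  simpa using h

theorem delta_list_eq (perm : List Int) (N : Nat)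
    (hpos : ∀ x ∈ perm.take N, (0:Int) ≤ x) :
    (PySem.List.pyRange 0 ((N : Nat) : Int) 1).foldl (fun delta t =>
      delta ++ [(PySem.List.pyRange 0 ((N : Nat) : Int) 1).foldl (fun d i =>
          if 0 ≤ PySem.List.pyGetD perm i 0 ∧ PySem.List.pyGetD perm i 0 ≤ t then
            PySem.Int.bor d ((1 : Int) <<< i.toNat) else d) 0]) []
    = (List.range N).map (fun t => ((deltaN perm N t : Nat) : Int)) := by
  have hnn : ∀ i : Nat, i < N → (0:Int) ≤ perm.getD i 0 := by
    intro i hi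
    by_cases hil : i < perm.length
    · rw [List.getD_eq_getElem _ _ hil]
      have h1 : i < (perm.take N).length := by simp; omega
      have h2 : (perm.take N)[i] = perm[i] := List.getElem_take
      exact hpos _ (h2 ▸ List.getElem_mem h1)
    · rw [List.getD_eq_default _ _ (by omega)]
  rw [PySem.List.pyRange_zero_natCast, PySem.List.foldl_append_singleton_eq_map, List.map_map]
  apply List.map_congr_left
  intro t ht
  simp only [Function.comp]
  have h := foldl_cast_comm
    (fun d i =>
      if 0 ≤ PySem.List.pyGetD perm i 0 ∧ PySem.List.pyGetD perm i 0 ≤ ((t : Nat) : Int) then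
        PySem.Int.bor d ((1 : Int) <<< i.toNat) else d)
    (fun d i => if srcOf perm i ≤ t then d ||| (1 <<< i) else d)
    (List.range N)
    (fun a i hi => by
      have hiN : i < N := List.mem_range.mp hi
      have hget : PySem.List.pyGetD perm (i : Int) 0 = perm.getD i 0 := by
        simp [pysem]
      simp only [hget, Int.toNat_natCast]
      have hcond : (0 ≤ perm.getD i 0 ∧ perm.getD i 0 ≤ ((t : Nat) : Int)) ↔ srcOf perm i ≤ t := by
        constructor
        · intro hc; exact Int.toNat_le.mpr hc.2
        · intro hc; exact ⟨hnn i hiN, Int.toNat_le.mp hc⟩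
      by_cases hc : srcOf perm i ≤ t
      · rw [if_pos (hcond.mpr hc), if_pos hc]
        rw [show (1 : Int) = ((1 : Nat) : Int) from rfl, natCast_shiftLeft, PySem.Int.bor_natCast]
      · rw [if_neg (fun hh => hc (hcond.mp hh)), if_neg hc])
    0
  simpa using h

theorem main_loop (perm : List Int) (func_idx : Int) (N : Nat) :
    ∀ (m k : Nat) (acc : Int), k + m = 2 ^ N →
    (((List.range' k m).map (fun (i : Nat) => (i : Int))).foldl (fun (p : Int × Int) j =>
        (PySem.Int.bor p.1 (PySem.Int.band (func_idx >>> p.2.toNat) 1 <<< j.toNat),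
         if j + 1 < ((2 ^ N : Nat) : Int) then
           PySem.Int.bxor p.2 (PySem.List.pyGetD
             ((List.range N).map (fun t => ((deltaN perm N t : Nat) : Int)))
             ((PySem.Int.bitLength (PySem.Int.bxor j (j + 1)) : Int) - 1) 0)
         else p.2))
      (acc, ((phiN perm N k : Nat) : Int))).1
    = ((List.range' k m).map (fun (i : Nat) => (i : Int))).foldl (fun new_idx j =>
        PySem.Int.bor new_idx
          (PySem.Int.band (func_idx >>> (apply_perm_to_input_idx perm j ((N : Nat) : Int)).toNat) 1 <<< j.toNat)) acc := by
  intro m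
  induction m with
  | zero => intro k acc _; rfl
  | succ m ih =>
      intro k acc hk
      rw [List.range'_succ]
      simp only [List.map_cons, List.foldl_cons, inner_eq_phiN]
      cases m with
      | zero => rw [cast_shift]; rfl
      | succ m' =>
          have hklt : ((k : Int)) + 1 < ((2 ^ N : Nat) : Int) := by
            have : k + 1 < 2 ^ N := by omega
            exact_mod_cast this
          rw [if_pos hklt]
          obtain ⟨s, hs, hx⟩ := xor_succ_block k
          have hb : PySem.Int.bxor ((k : Nat) : Int) (((k : Nat) : Int) + 1) = ((2 ^ s - 1 : Nat) : Int) := by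
            rw [show (((k : Nat) : Int) + 1) = (((k + 1 : Nat)) : Int) by push_cast; ring]
            rw [PySem.Int.bxor_natCast, hx]
          rw [hb, bitLength_pow_sub_one s hs]
          have hsN : s - 1 < N := by
            have hxlt : 2 ^ s - 1 < 2 ^ N := by
              rw [← hx]
              exact Nat.xor_lt_two_pow (by omega) (by omega)
            by_contra hc
            have hmono : 2 ^ N ≤ 2 ^ (s - 1) := Nat.pow_le_pow_right (by norm_num) (by omega)
            have hsp : 2 ^ s = 2 * 2 ^ (s - 1) := by
              conv_lhs => rw [show s = (s - 1) + 1 from by omega]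
              ring
            have h1 : 1 ≤ 2 ^ (s - 1) := Nat.one_le_two_pow
            omega
          have hidx : ((s : Nat) : Int) - 1 = (((s - 1 : Nat)) : Int) := by omega
          have hget : PySem.List.pyGetD
              ((List.range N).map (fun t => ((deltaN perm N t : Nat) : Int)))
              (((s - 1 : Nat)) : Int) 0 = ((deltaN perm N (s - 1) : Nat) : Int) := by
            rw [PySem.List.pyGetD_natCast]
            rw [List.getD_eq_getElem _ _ (by simpa using hsN)]
            simp
          rw [hidx, hget, PySem.Int.bxor_natCast, ← phiN_succ perm N k s hs hx, cast_shift]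
          exact ih (k + 1) _ (by omega)

-- ===== VERDICT (by name: the statement is the Claim_ definition above) =====
theorem apply_perm_to_func_spec : Claim_equal_apply_perm_to_func := by
  unfold Claim_equal_apply_perm_to_func
  intro perm func_idx n _ hpre
  obtain ⟨hn, hlen, hpos0⟩ := hpre
  unfold Spec_apply_perm_to_func
  obtain ⟨N, rfl⟩ : ∃ N : Nat, n = (N : Int) := ⟨n.toNat, (Int.toNat_of_nonneg hn).symm⟩
  have hpos : ∀ x ∈ perm.take N, (0:Int) ≤ x := by simpa using hpos0
  unfold apply_perm_to_func apply_perm_to_func_alt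
  simp only [Int.toNat_natCast]
  have hsize : ((1:Int) <<< N) = ((2 ^ N : Nat) : Int) := by
    rw [show (1:Int) = ((1:Nat):Int) from rfl, natCast_shiftLeft, Nat.one_shiftLeft]
  simp only [hsize, delta_list_eq perm N hpos]
  rw [PySem.List.pyRange_zero_natCast, List.range_eq_range']
  have h := main_loop perm func_idx N (2 ^ N) 0 0 (by omega)
  rw [phiN_zero] at h
  simpa using h.symm
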